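-- pv_equiv track=rewrite | github.com/mydiybc-bot/DIY | server.py | _filter_reports
-- ===== SOURCE A (Python) =====
-- def _filter_reports(reports: list[dict], filters: dict[str, list[str]]) -> list[dict]:
--     employee_id = (filters.get("employee_id") or [""])[0].strip()
--     section_id = (filters.get("section_id") or [""])[0].strip()
--     date_from = (filters.get("date_from") or [""])[0].strip()
--     date_to = (filters.get("date_to") or [""])[0].strip()
--
--     filtered = reports
--     if employee_id:
--         filtered = [item for item in filtered if item.get("employee_id", "") == employee_id]
--     if section_id:
--         filtered = [item for item in filtered if item.get("section_id", "") == section_id]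
--     if date_from:
--         filtered = [item for item in filtered if item.get("created_at", "")[:10] >= date_from]
--     if date_to:
--         filtered = [item for item in filtered if item.get("created_at", "")[:10] <= date_to]
--     return filtered
-- ===== SOURCE B (Python) =====
-- def _filter_reports(reports: list[dict], filters: dict[str, list[str]]) -> list[dict]:
--     def first(key):
--         return (filters.get(key) or [""])[0].strip()
--
--     employee_id = first("employee_id")
--     section_id = first("section_id")
--     date_from = first("date_from")
--     date_to = first("date_to")
--
--     preds = []
--     if employee_id:
--         preds.append(lambda r: r.get("employee_id", "") == employee_id)
--     if section_id:
--         preds.append(lambda r: r.get("section_id", "") == section_id)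
--     if date_from:
--         preds.append(lambda r: r.get("created_at", "")[:10] >= date_from)
--     if date_to:
--         preds.append(lambda r: r.get("created_at", "")[:10] <= date_to)
--     return [r for r in reports if all(p(r) for p in preds)]
-- ===== Notes on version B (the rewrite author's own statement) =====
-- stated objective: alternative
-- what changed: B parses the four filter values once, collects one predicate per active filter into a list, and filters the reports in a single pass requiring all predicates, instead of A's up-to-four sequential narrowing passes over intermediate lists.
import Mathlib
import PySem

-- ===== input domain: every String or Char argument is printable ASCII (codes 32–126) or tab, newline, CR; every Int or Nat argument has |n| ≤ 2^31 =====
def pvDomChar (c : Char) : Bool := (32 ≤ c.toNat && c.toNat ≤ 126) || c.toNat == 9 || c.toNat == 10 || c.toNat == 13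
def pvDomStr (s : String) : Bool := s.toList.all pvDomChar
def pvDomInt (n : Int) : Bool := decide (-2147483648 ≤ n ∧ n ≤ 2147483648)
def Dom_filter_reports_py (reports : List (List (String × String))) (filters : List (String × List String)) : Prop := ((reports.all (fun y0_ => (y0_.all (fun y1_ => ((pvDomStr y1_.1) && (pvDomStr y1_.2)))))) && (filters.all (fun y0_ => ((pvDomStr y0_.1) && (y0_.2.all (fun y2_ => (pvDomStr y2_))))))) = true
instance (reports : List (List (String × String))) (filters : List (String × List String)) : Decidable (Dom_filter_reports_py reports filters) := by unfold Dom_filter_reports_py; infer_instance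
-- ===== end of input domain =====

-- B replaces A's four sequential narrowing passes by parsing the filters once, collecting one
-- predicate per active filter, and making a single filtering pass with their conjunction (objective: alternative decomposition).

-- ===== PORT A =====
-- (filters.get(key) or [""])[0].strip(), written inline four times as in A
def filter_reports_py (reports : List (List (String × String))) (filters : List (String × List String)) : List (List (String × String)) :=
  let employee_id := PySem.Str.strip (PySem.List.pyGetD
    (match filters.lookup "employee_id" with | some v => if v = [] then [""] else v | none => [""]) 0 "")
  let section_id := PySem.Str.strip (PySem.List.pyGetD
    (match filters.lookup "section_id" with | some v => if v = [] then [""] else v | none => [""]) 0 "")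
  let date_from := PySem.Str.strip (PySem.List.pyGetD
    (match filters.lookup "date_from" with | some v => if v = [] then [""] else v | none => [""]) 0 "")
  let date_to := PySem.Str.strip (PySem.List.pyGetD
    (match filters.lookup "date_to" with | some v => if v = [] then [""] else v | none => [""]) 0 "")
  let filtered := reports
  let filtered := if employee_id ≠ "" then
    filtered.filter (fun item => ((item.lookup "employee_id").getD "") == employee_id) else filtered
  let filtered := if section_id ≠ "" then
    filtered.filter (fun item => ((item.lookup "section_id").getD "") == section_id) else filtered
  let filtered := if date_from ≠ "" then
    filtered.filter (fun item => decide (date_from ≤ PySem.Str.slice ((item.lookup "created_at").getD "") none (some 10))) else filtered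
  let filtered := if date_to ≠ "" then
    filtered.filter (fun item => decide (PySem.Str.slice ((item.lookup "created_at").getD "") none (some 10) ≤ date_to)) else filtered
  filtered

-- ===== PORT B =====
-- B's helper first(key): (filters.get(key) or [""])[0].strip()
def pvFirst (filters : List (String × List String)) (key : String) : String :=
  PySem.Str.strip (PySem.List.pyGetD
    (match filters.lookup key with | some v => if v = [] then [""] else v | none => [""]) 0 "")

def filter_reports_py_alt (reports : List (List (String × String))) (filters : List (String × List String)) : List (List (String × String)) :=
  let employee_id := pvFirst filters "employee_id"
  let section_id := pvFirst filters "section_id"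
  let date_from := pvFirst filters "date_from"
  let date_to := pvFirst filters "date_to"
  let preds : List (List (String × String) → Bool) := []
  let preds := if employee_id ≠ "" then
    preds ++ [fun r => ((r.lookup "employee_id").getD "") == employee_id] else preds
  let preds := if section_id ≠ "" then
    preds ++ [fun r => ((r.lookup "section_id").getD "") == section_id] else preds
  let preds := if date_from ≠ "" then
    preds ++ [fun r => decide (date_from ≤ PySem.Str.slice ((r.lookup "created_at").getD "") none (some 10))] else preds
  let preds := if date_to ≠ "" then
    preds ++ [fun r => decide (PySem.Str.slice ((r.lookup "created_at").getD "") none (some 10) ≤ date_to)] else preds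
  reports.filter (fun r => preds.all (fun p => p r))

-- ===== PRECONDITION & SPEC =====
def Spec_filter_reports_py (reports : List (List (String × String))) (filters : List (String × List String)) (out : List (List (String × String))) : Prop := out = filter_reports_py_alt reports filters
instance (reports : List (List (String × String))) (filters : List (String × List String)) (out : List (List (String × String))) : Decidable (Spec_filter_reports_py reports filters out) := by unfold Spec_filter_reports_py; infer_instance

-- ===== CLAIM (what is proved, stated in full; the proofs are below) =====
def Claim_equal_filter_reports_py : Prop := ∀ (reports : List (List (String × String))) (filters : List (String × List String)), Dom_filter_reports_py reports filters → Spec_filter_reports_py reports filters (filter_reports_py reports filters)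

-- ===== LEMMAS AND PROOFS =====

-- A chain of conditional filter passes equals one pass filtering by the conditionally collected predicates.
theorem pvChain {α : Type} (l : List α) (c1 c2 c3 c4 : Prop) [Decidable c1] [Decidable c2] [Decidable c3] [Decidable c4]
    (p1 p2 p3 p4 : α → Bool) :
    (let filtered := l
     let filtered := if c1 then filtered.filter p1 else filtered
     let filtered := if c2 then filtered.filter p2 else filtered
     let filtered := if c3 then filtered.filter p3 else filtered
     let filtered := if c4 then filtered.filter p4 else filtered
     filtered)
    =
    (let preds : List (α → Bool) := []
     let preds := if c1 then preds ++ [p1] else preds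
     let preds := if c2 then preds ++ [p2] else preds
     let preds := if c3 then preds ++ [p3] else preds
     let preds := if c4 then preds ++ [p4] else preds
     l.filter (fun r => preds.all (fun p => p r))) := by
  dsimp only
  split_ifs <;>
    simp only [List.filter_filter, List.nil_append, List.cons_append, List.all_cons, List.all_nil, List.filter_true] <;>
    exact List.filter_congr (fun a _ => by cases p1 a <;> cases p2 a <;> cases p3 a <;> cases p4 a <;> rfl)

-- ===== VERDICT (by name: the statement is the Claim_ definition above) =====
theorem filter_reports_py_spec : Claim_equal_filter_reports_py := by
  intro reports filters _
  unfold Spec_filter_reports_py filter_reports_py filter_reports_py_alt pvFirst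
  exact pvChain reports _ _ _ _ _ _ _ _
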